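-- pv_equiv track=rewrite | github.com/Xyporz/DiffDGSSv2 | src/feature_extractors_time_pro.py | get_required_feature_levels
-- ===== SOURCE A (Python) =====
-- def get_required_feature_levels(required_indices, resolution=512):
--     """
--     Get the actual feature levels that need to be saved/loaded based on required indices.
--
--     Args:
--         required_indices: List of feature indices actually needed (from config blocks)
--         resolution: Image resolution (256 or 512) to determine feature configuration
--
--     Returns:
--         Set of feature level names that are actually used
--     """
--     # Feature configuration based on resolution
--     if resolution == 256:
--         default_config = {
--             'first': [0, 1],                    # Early low-resolution features
--             'second': [2, 3, 4],               # Early-mid resolution features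
--             'third': [5, 6, 7],                # Mid-level features
--             'fine': [8, 9, 10],                # Fine-grained features
--             'low': [11, 12, 13],               # Low-level semantic features
--             'mid': [14, 15, 16],               # Mid-level semantic features
--             'high': [17]                       # High-level semantic features (256 resolution)
--         }
--     else:  # resolution == 512
--         default_config = {
--             'first': [0, 1],                    # Early low-resolution features
--             'second': [2, 3, 4],               # Early-mid resolution features
--             'third': [5, 6, 7],                # Mid-level features
--             'fine': [8, 9, 10],                # Fine-grained features
--             'low': [11, 12, 13],               # Low-level semantic features
--             'mid': [14, 15, 16],               # Mid-level semantic features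
--             'high': [17, 18, 19, 20]           # High-level semantic features (512 resolution)
--         }
--
--     # Find which feature levels actually use the required indices
--     used_levels = set()
--     for level_name, level_indices in default_config.items():
--         # Check if this level uses any of the required indices
--         if any(idx in required_indices for idx in level_indices):
--             used_levels.add(level_name)
--
--     return used_levels
-- ===== SOURCE B (Python) =====
-- def get_required_feature_levels(required_indices, resolution=512):
--     """Arithmetic bucketing: compute each required index's level id directly by
--     a formula (no per-level index lists, no membership scans), mark it in a
--     boolean table, then emit the marked level names in canonical order."""
--     names = ('first', 'second', 'third', 'fine', 'low', 'mid', 'high')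
--     top = 17 if resolution == 256 else 20
--     hit = [False] * 7
--     for i in required_indices:
--         if 0 <= i <= top:
--             hit[0 if i < 2 else min((i + 1) // 3, 6)] = True
--     return {name for name, h in zip(names, hit) if h}
-- ===== Notes on version B (the rewrite author's own statement) =====
-- stated objective: faster
-- what changed: B discards A's dict of per-level index lists and its per-level membership scans of required_indices: it computes each required index's level id directly by an arithmetic formula (0 if i<2 else min((i+1)//3, 6)), marks it in a 7-slot boolean bucket table in one pass over required_indices, then emits the marked level names from the table.
import Mathlib
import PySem

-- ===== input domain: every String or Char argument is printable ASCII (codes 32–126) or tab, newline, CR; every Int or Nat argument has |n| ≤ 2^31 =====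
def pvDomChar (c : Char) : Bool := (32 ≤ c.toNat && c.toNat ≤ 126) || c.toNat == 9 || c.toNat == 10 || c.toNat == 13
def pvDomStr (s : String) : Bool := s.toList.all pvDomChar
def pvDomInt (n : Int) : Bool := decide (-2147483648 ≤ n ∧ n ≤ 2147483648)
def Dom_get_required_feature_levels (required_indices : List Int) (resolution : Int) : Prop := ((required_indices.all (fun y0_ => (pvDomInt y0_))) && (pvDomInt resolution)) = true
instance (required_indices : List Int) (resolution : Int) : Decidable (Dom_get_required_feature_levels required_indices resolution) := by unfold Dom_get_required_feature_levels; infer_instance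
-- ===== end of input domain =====

-- B replaces A's dict of per-level index lists with nested membership scans by arithmetic
-- bucketing: each required index's level id is computed by a formula, marked in a 7-slot
-- boolean table in one pass, and the marked names are emitted in order; objective: alternative.

-- ===== PORT A =====
def get_required_feature_levels (required_indices : List Int) (resolution : Int) : List String :=
  let default_config : PySem.Dict String (List Int) :=
    if resolution == 256 then
      PySem.Dict.ofList [("first", [0, 1]), ("second", [2, 3, 4]), ("third", [5, 6, 7]),
        ("fine", [8, 9, 10]), ("low", [11, 12, 13]), ("mid", [14, 15, 16]), ("high", [17])]
    else
      PySem.Dict.ofList [("first", [0, 1]), ("second", [2, 3, 4]), ("third", [5, 6, 7]),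
        ("fine", [8, 9, 10]), ("low", [11, 12, 13]), ("mid", [14, 15, 16]), ("high", [17, 18, 19, 20])]
  let used_levels : PySem.Set String :=
    default_config.items.foldl
      (fun s p => if p.2.any (fun idx => required_indices.contains idx) then PySem.Set.add s p.1 else s)
      PySem.Set.empty
  used_levels

-- ===== PORT B =====
-- level id of an in-range index: 0 if i < 2 else min((i + 1) // 3, 6)
def pvLvl (i : Int) : Int := if i < 2 then 0 else min (PySem.Int.floordiv (i + 1) 3) 6
-- one loop iteration: if 0 <= i <= top: hit[lvl] = True  (lvl is in 0..6, so .toNat is exact)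
def pvStep (top : Int) (h : List Bool) (i : Int) : List Bool :=
  if 0 ≤ i ∧ i ≤ top then h.set (pvLvl i).toNat true else h

def get_required_feature_levels_alt (required_indices : List Int) (resolution : Int) : List String :=
  let names : List String := ["first", "second", "third", "fine", "low", "mid", "high"]
  let top : Int := if resolution == 256 then 17 else 20
  let hit : List Bool := required_indices.foldl (pvStep top) (List.replicate 7 false)
  -- {name for name, h in zip(names, hit) if h}
  (names.zip hit).foldl (fun s p => if p.2 then PySem.Set.add s p.1 else s) PySem.Set.empty

-- ===== PRECONDITION & SPEC =====
def Spec_get_required_feature_levels (required_indices : List Int) (resolution : Int) (out : List String) : Prop := out = get_required_feature_levels_alt required_indices resolution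
instance (required_indices : List Int) (resolution : Int) (out : List String) : Decidable (Spec_get_required_feature_levels required_indices resolution out) := by unfold Spec_get_required_feature_levels; infer_instance

-- ===== CLAIM (what is proved, stated in full; the proofs are below) =====
def Claim_equal_get_required_feature_levels : Prop := ∀ (required_indices : List Int) (resolution : Int), Dom_get_required_feature_levels required_indices resolution → Spec_get_required_feature_levels required_indices resolution (get_required_feature_levels required_indices resolution)

-- ===== LEMMAS AND PROOFS =====

-- B's bucket table after the loop: slot k is set iff some required index lies in level k's range.
lemma hit_eq (top : Int) (htop : 17 ≤ top) :
    ∀ (req : List Int) (b0 b1 b2 b3 b4 b5 b6 : Bool),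
    req.foldl (pvStep top) [b0, b1, b2, b3, b4, b5, b6] =
      [b0 || req.any (fun i => decide (0 ≤ i) && decide (i ≤ 1)),
       b1 || req.any (fun i => decide (2 ≤ i) && decide (i ≤ 4)),
       b2 || req.any (fun i => decide (5 ≤ i) && decide (i ≤ 7)),
       b3 || req.any (fun i => decide (8 ≤ i) && decide (i ≤ 10)),
       b4 || req.any (fun i => decide (11 ≤ i) && decide (i ≤ 13)),
       b5 || req.any (fun i => decide (14 ≤ i) && decide (i ≤ 16)),
       b6 || req.any (fun i => decide (17 ≤ i) && decide (i ≤ top))] := by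
  intro req
  induction req with
  | nil => intro b0 b1 b2 b3 b4 b5 b6; simp
  | cons i req ih =>
    intro b0 b1 b2 b3 b4 b5 b6
    rw [List.foldl_cons]
    by_cases hin : 0 ≤ i ∧ i ≤ top
    · rcases (by omega : i ≤ 1 ∨ (2 ≤ i ∧ i ≤ 4) ∨ (5 ≤ i ∧ i ≤ 7) ∨ (8 ≤ i ∧ i ≤ 10) ∨
          (11 ≤ i ∧ i ≤ 13) ∨ (14 ≤ i ∧ i ≤ 16) ∨ 17 ≤ i) with
        h1 | ⟨ha, hb⟩ | ⟨ha, hb⟩ | ⟨ha, hb⟩ | ⟨ha, hb⟩ | ⟨ha, hb⟩ | h17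
      · have hl : pvStep top [b0, b1, b2, b3, b4, b5, b6] i = [true, b1, b2, b3, b4, b5, b6] := by
          unfold pvStep pvLvl
          rw [if_pos hin, if_pos (show i < 2 by omega)]
          rfl
        rw [hl, ih]
        simp [List.any_cons, hin.1, h1, show ¬(2 : Int) ≤ i by omega, show ¬(5 : Int) ≤ i by omega,
          show ¬(8 : Int) ≤ i by omega, show ¬(11 : Int) ≤ i by omega,
          show ¬(14 : Int) ≤ i by omega, show ¬(17 : Int) ≤ i by omega]
      · have hq : PySem.Int.floordiv (i + 1) 3 = 1 := by
          rw [PySem.Int.floordiv_eq_iff_of_pos (by norm_num)]; omega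
        have hl : pvStep top [b0, b1, b2, b3, b4, b5, b6] i = [b0, true, b2, b3, b4, b5, b6] := by
          unfold pvStep pvLvl
          rw [if_pos hin, if_neg (show ¬i < 2 by omega), hq]
          rfl
        rw [hl, ih]
        simp [List.any_cons, ha, hb, show ¬i ≤ 1 by omega, show ¬(5 : Int) ≤ i by omega,
          show ¬(8 : Int) ≤ i by omega, show ¬(11 : Int) ≤ i by omega,
          show ¬(14 : Int) ≤ i by omega, show ¬(17 : Int) ≤ i by omega]
      · have hq : PySem.Int.floordiv (i + 1) 3 = 2 := by
          rw [PySem.Int.floordiv_eq_iff_of_pos (by norm_num)]; omega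
        have hl : pvStep top [b0, b1, b2, b3, b4, b5, b6] i = [b0, b1, true, b3, b4, b5, b6] := by
          unfold pvStep pvLvl
          rw [if_pos hin, if_neg (show ¬i < 2 by omega), hq]
          rfl
        rw [hl, ih]
        simp [List.any_cons, ha, hb, show ¬i ≤ 1 by omega, show ¬i ≤ 4 by omega,
          show ¬(8 : Int) ≤ i by omega, show ¬(11 : Int) ≤ i by omega,
          show ¬(14 : Int) ≤ i by omega, show ¬(17 : Int) ≤ i by omega]
      · have hq : PySem.Int.floordiv (i + 1) 3 = 3 := by
          rw [PySem.Int.floordiv_eq_iff_of_pos (by norm_num)]; omega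
        have hl : pvStep top [b0, b1, b2, b3, b4, b5, b6] i = [b0, b1, b2, true, b4, b5, b6] := by
          unfold pvStep pvLvl
          rw [if_pos hin, if_neg (show ¬i < 2 by omega), hq]
          rfl
        rw [hl, ih]
        simp [List.any_cons, ha, hb, show ¬i ≤ 1 by omega, show ¬i ≤ 4 by omega,
          show ¬i ≤ 7 by omega, show ¬(11 : Int) ≤ i by omega,
          show ¬(14 : Int) ≤ i by omega, show ¬(17 : Int) ≤ i by omega]
      · have hq : PySem.Int.floordiv (i + 1) 3 = 4 := by
          rw [PySem.Int.floordiv_eq_iff_of_pos (by norm_num)]; omega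
        have hl : pvStep top [b0, b1, b2, b3, b4, b5, b6] i = [b0, b1, b2, b3, true, b5, b6] := by
          unfold pvStep pvLvl
          rw [if_pos hin, if_neg (show ¬i < 2 by omega), hq]
          rfl
        rw [hl, ih]
        simp [List.any_cons, ha, hb, show ¬i ≤ 1 by omega, show ¬i ≤ 4 by omega,
          show ¬i ≤ 7 by omega, show ¬i ≤ 10 by omega,
          show ¬(14 : Int) ≤ i by omega, show ¬(17 : Int) ≤ i by omega]
      · have hq : PySem.Int.floordiv (i + 1) 3 = 5 := by
          rw [PySem.Int.floordiv_eq_iff_of_pos (by norm_num)]; omega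
        have hl : pvStep top [b0, b1, b2, b3, b4, b5, b6] i = [b0, b1, b2, b3, b4, true, b6] := by
          unfold pvStep pvLvl
          rw [if_pos hin, if_neg (show ¬i < 2 by omega), hq]
          rfl
        rw [hl, ih]
        simp [List.any_cons, ha, hb, show ¬i ≤ 1 by omega, show ¬i ≤ 4 by omega,
          show ¬i ≤ 7 by omega, show ¬i ≤ 10 by omega, show ¬i ≤ 13 by omega,
          show ¬(17 : Int) ≤ i by omega]
      · have hq : min (PySem.Int.floordiv (i + 1) 3) 6 = 6 := by
          have h6 : (6 : Int) ≤ PySem.Int.floordiv (i + 1) 3 :=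
            (PySem.Int.le_floordiv_iff_mul_le (by norm_num)).mpr (by omega)
          omega
        have hl : pvStep top [b0, b1, b2, b3, b4, b5, b6] i = [b0, b1, b2, b3, b4, b5, true] := by
          unfold pvStep pvLvl
          rw [if_pos hin, if_neg (show ¬i < 2 by omega), hq]
          rfl
        rw [hl, ih]
        simp [List.any_cons, h17, hin.2, show ¬i ≤ 1 by omega, show ¬i ≤ 4 by omega,
          show ¬i ≤ 7 by omega, show ¬i ≤ 10 by omega, show ¬i ≤ 13 by omega,
          show ¬i ≤ 16 by omega]
    · have hl : pvStep top [b0, b1, b2, b3, b4, b5, b6] i = [b0, b1, b2, b3, b4, b5, b6] := by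
        simp [pvStep, hin]
      rw [hl, ih]
      rcases (by omega : i < 0 ∨ top < i) with hneg | hbig
      · simp [List.any_cons, show ¬(0 : Int) ≤ i by omega, show ¬(2 : Int) ≤ i by omega,
          show ¬(5 : Int) ≤ i by omega, show ¬(8 : Int) ≤ i by omega, show ¬(11 : Int) ≤ i by omega,
          show ¬(14 : Int) ≤ i by omega, show ¬(17 : Int) ≤ i by omega]
      · simp [List.any_cons, show ¬i ≤ 1 by omega, show ¬i ≤ 4 by omega,
          show ¬i ≤ 7 by omega, show ¬i ≤ 10 by omega, show ¬i ≤ 13 by omega,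
          show ¬i ≤ 16 by omega, show ¬i ≤ top by omega]

-- A's per-level test (scan the level's index list for membership in req) equals
-- B's range test over req, when L enumerates exactly the integers in [lo, hi].
lemma cond_eq (req L : List Int) (lo hi : Int)
    (h : ∀ x : Int, (lo ≤ x ∧ x ≤ hi) ↔ x ∈ L) :
    (L.any (fun idx => req.contains idx))
      = (req.any (fun i => decide (lo ≤ i) && decide (i ≤ hi))) := by
  rw [Bool.eq_iff_iff]
  simp only [List.any_eq_true, List.contains_iff_mem, Bool.and_eq_true, decide_eq_true_eq]
  constructor
  · rintro ⟨idx, hidx, hm⟩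
    exact ⟨idx, hm, (h idx).2 hidx⟩
  · rintro ⟨r, hm, hr⟩
    exact ⟨r, (h r).1 hr, hm⟩

-- ===== VERDICT (by name: the statement is the Claim_ definition above) =====
theorem get_required_feature_levels_spec : Claim_equal_get_required_feature_levels := by
  intro required_indices resolution _
  unfold Spec_get_required_feature_levels
  unfold get_required_feature_levels get_required_feature_levels_alt
  by_cases hr : resolution = 256
  · have hi : (PySem.Dict.ofList [("first", ([0, 1] : List Int)), ("second", [2, 3, 4]), ("third", [5, 6, 7]),
        ("fine", [8, 9, 10]), ("low", [11, 12, 13]), ("mid", [14, 15, 16]), ("high", [17])] : PySem.Dict String (List Int)).items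
        = [("first", [0, 1]), ("second", [2, 3, 4]), ("third", [5, 6, 7]),
        ("fine", [8, 9, 10]), ("low", [11, 12, 13]), ("mid", [14, 15, 16]), ("high", [17])] := by rfl
    simp only [hr, beq_self_eq_true, if_true, hi,
      show (List.replicate 7 false) = [false, false, false, false, false, false, false] from rfl,
      hit_eq 17 (by norm_num) required_indices, Bool.false_or, List.zip, List.zipWith, List.foldl]
    rw [cond_eq required_indices [0, 1] 0 1 (by intro x; simp; omega),
        cond_eq required_indices [2, 3, 4] 2 4 (by intro x; simp; omega),
        cond_eq required_indices [5, 6, 7] 5 7 (by intro x; simp; omega),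
        cond_eq required_indices [8, 9, 10] 8 10 (by intro x; simp; omega),
        cond_eq required_indices [11, 12, 13] 11 13 (by intro x; simp; omega),
        cond_eq required_indices [14, 15, 16] 14 16 (by intro x; simp; omega),
        cond_eq required_indices [17] 17 17 (by intro x; simp; omega)]
  · have hb : (resolution == 256) = false := by simp [hr]
    have hi : (PySem.Dict.ofList [("first", ([0, 1] : List Int)), ("second", [2, 3, 4]), ("third", [5, 6, 7]),
        ("fine", [8, 9, 10]), ("low", [11, 12, 13]), ("mid", [14, 15, 16]), ("high", [17, 18, 19, 20])] : PySem.Dict String (List Int)).items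
        = [("first", [0, 1]), ("second", [2, 3, 4]), ("third", [5, 6, 7]),
        ("fine", [8, 9, 10]), ("low", [11, 12, 13]), ("mid", [14, 15, 16]), ("high", [17, 18, 19, 20])] := by rfl
    simp only [hb, Bool.false_eq_true, if_false, hi,
      show (List.replicate 7 false) = [false, false, false, false, false, false, false] from rfl,
      hit_eq 20 (by norm_num) required_indices, Bool.false_or, List.zip, List.zipWith, List.foldl]
    rw [cond_eq required_indices [0, 1] 0 1 (by intro x; simp; omega),
        cond_eq required_indices [2, 3, 4] 2 4 (by intro x; simp; omega),
        cond_eq required_indices [5, 6, 7] 5 7 (by intro x; simp; omega),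
        cond_eq required_indices [8, 9, 10] 8 10 (by intro x; simp; omega),
        cond_eq required_indices [11, 12, 13] 11 13 (by intro x; simp; omega),
        cond_eq required_indices [14, 15, 16] 14 16 (by intro x; simp; omega),
        cond_eq required_indices [17, 18, 19, 20] 17 20 (by intro x; simp; omega)]
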